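-- pv_equiv track=rewrite | github.com/RealDev0925/AI-Image-Audio-Analysis-Flask | sd_images.py | get_prompt_variables
-- ===== SOURCE A (Python) =====
-- def clean_dictionary_values(input_dict, lowercase=True):
--     """
--     This function takes a dictionary as input, and for each string value,
--     it removes leading and trailing whitespaces, extra lines.
--     It also converts it to lower case if the lowercase parameter is True (default).
--     """
--     # Iterate over all key-value pairs in the dictionary
--     for key, value in input_dict.items():
--         if isinstance(value, str):  # Check if the value is a string
--             # Strip leading/trailing whitespace and replace newlines with space
--             cleaned_value = ' '.join(value.split())
--             # Convert to lower case if the lowercase flag is set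
--             if lowercase:
--                 cleaned_value = cleaned_value.lower()
--             # Update the value in the dictionary
--             input_dict[key] = cleaned_value
--
--     return input_dict
--
-- def get_prompt_variables(data):
--     """gets the prompt variables for a given list of data, also removes the prompt_variables from the list
--     input and output data format is a list of dictionaries:
--     [{'name': 'workflow_id', 'value': '5'},
--
--     """
--     prompt_variables_dict = {}
--     for item in data:
--         if 'prompt_variables' in item['name']:
--             parts = item['name'].split('[')
--             parts = item['name'].split('[')
--
--             position = int(parts[1].split(']')[0])
--             key_or_value = parts[2].split(']')[0]
--             if position not in prompt_variables_dict:
--                 prompt_variables_dict[position] = {}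
--             prompt_variables_dict[position][key_or_value] = item['value']
--
--     prompt_variables = [val for key, val in sorted(prompt_variables_dict.items())]
--
--     # clean the prompt_variables
--     prompt_variables_cleaned = []
--     for pv in prompt_variables:
--         pv = clean_dictionary_values(pv)
--         prompt_variables_cleaned.append(pv)
--
--     prompt_variables = prompt_variables_cleaned
--
--     # remove the prompt_variables from the list
--     cleaned_list = []  #
--     for item in data:
--         if 'prompt_variables' not in item['name']:
--             cleaned_list.append(item)
--
--     # if the key contain prompt, clean the values
--     for item in cleaned_list:
--         if 'prompt' in item['name']:
--             item = clean_dictionary_values(item)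
--
--     # cleaned_list.append({'name': 'prompt_variables', 'value': prompt_variables})
--     return (prompt_variables, cleaned_list)
-- ===== SOURCE B (Python) =====
-- def _norm(s):
--     return ' '.join(s.split()).lower()
--
-- def get_prompt_variables(data):
--     # one pass: split data into prompt-variable items and the rest
--     pv_items = []
--     others = []
--     for item in data:
--         (pv_items if 'prompt_variables' in item['name'] else others).append(item)
--     # parse each prompt-variable item into a (position, key, value) triple
--     triples = []
--     for item in pv_items:
--         parts = item['name'].split('[')
--         triples.append((int(parts[1].split(']')[0]),
--                         parts[2].split(']')[0],
--                         item['value']))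
--     # for each distinct position in ascending order, assemble its cleaned sub-dict
--     prompt_variables = []
--     for p in sorted({t[0] for t in triples}):
--         group = {}
--         for pos, key, value in triples:
--             if pos == p:
--                 group[key] = value
--         prompt_variables.append({k: _norm(v) for k, v in group.items()})
--     # mutate in place the remaining items whose name mentions 'prompt'
--     for item in others:
--         if 'prompt' in item['name']:
--             for k in item:
--                 item[k] = _norm(item[k])
--     return (prompt_variables, others)
-- ===== Notes on version B (the rewrite author's own statement) =====
-- stated objective: alternative
-- what changed: B replaces A's keyed dict-of-dicts index plus a sort of its items with: one partition pass, parsing each prompt-variable item into a (position, key, value) triple, then for each distinct position in sorted order assembling its sub-dict by a filtered scan over the triples; the kept items are cleaned from the partitioned remainder.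
import Mathlib
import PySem

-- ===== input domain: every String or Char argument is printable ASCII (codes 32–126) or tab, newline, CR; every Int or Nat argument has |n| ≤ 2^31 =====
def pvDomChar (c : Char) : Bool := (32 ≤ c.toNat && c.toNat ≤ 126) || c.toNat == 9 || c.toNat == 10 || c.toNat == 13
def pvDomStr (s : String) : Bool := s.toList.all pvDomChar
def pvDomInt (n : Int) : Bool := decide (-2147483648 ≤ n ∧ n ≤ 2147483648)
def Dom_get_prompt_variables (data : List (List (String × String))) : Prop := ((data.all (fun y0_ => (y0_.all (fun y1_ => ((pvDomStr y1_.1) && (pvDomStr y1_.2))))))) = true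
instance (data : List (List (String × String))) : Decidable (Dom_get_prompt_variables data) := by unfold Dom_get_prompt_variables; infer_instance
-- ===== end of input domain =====

-- B regroups by partition + parsed triples + sorted distinct positions instead of A's keyed dict-of-dicts index;
-- equivalence is about the RETURN value only (the Python A and B both also mutate the kept caller dicts in place).

-- shared small helpers (the identical sub-expressions both Pythons contain)
-- s.split(sep) for a non-empty literal sep (split? is always some there)
def pvSplit (s sep : String) : List String := (PySem.Str.split? s sep).getD []
-- ' '.join(v.split()).lower()
def pvNorm (v : String) : String := PySem.Str.lower (PySem.Str.join " " (PySem.Str.split₀ v))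
-- item[k] (Pre_ guarantees the key is present where A reads it)
def pvGet (item : List (String × String)) (k : String) : String := ((PySem.Dict.mk item).get? k).getD ""
-- clean_dictionary_values on an all-string dict: every value normalised, keys kept in order
def pvCleanPairs (d : List (String × String)) : List (String × String) := d.map (fun kv => (kv.1, pvNorm kv.2))
-- 'prompt_variables' in item['name']
def pvIsPV (item : List (String × String)) : Bool := PySem.Str.isIn "prompt_variables" (pvGet item "name")
-- parts = name.split('['); (int(parts[1].split(']')[0]), parts[2].split(']')[0], item['value'])
def pvParse (item : List (String × String)) : Int × String × String :=
  ((PySem.Int.ofStr? ((pvSplit (PySem.List.pyGetD (pvSplit (pvGet item "name") "[") 1 "") "]").headD "")).getD 0,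
   ((pvSplit (PySem.List.pyGetD (pvSplit (pvGet item "name") "[") 2 "") "]").headD "",
    pvGet item "value"))

-- ===== PORT A =====
-- the body of A's first loop: prompt_variables_dict[position][key_or_value] = value (creating the inner dict if absent)
def pvStep (d : PySem.Dict Int (PySem.Dict String String)) (t : Int × String × String) : PySem.Dict Int (PySem.Dict String String) :=
  d.insert t.1 ((d.getD t.1 PySem.Dict.empty).insert t.2.1 t.2.2)

def get_prompt_variables (data : List (List (String × String))) : (List (List (String × String))) × (List (List (String × String))) :=
  let pvd : PySem.Dict Int (PySem.Dict String String) :=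
    data.foldl (fun d item => if pvIsPV item then pvStep d (pvParse item) else d) PySem.Dict.empty
  -- sorted(prompt_variables_dict.items()): keys are distinct, so Python's tuple sort compares positions only
  let prompt_variables := (PySem.List.sorted pvd.items (fun q => q.1)).map (·.2)
  let cleaned := prompt_variables.foldl (fun acc pv => acc ++ [pvCleanPairs pv.items]) []
  let cleaned_list := data.foldl (fun acc item => if pvIsPV item then acc else acc ++ [item]) []
  let final := cleaned_list.map (fun item => if PySem.Str.isIn "prompt" (pvGet item "name") then pvCleanPairs item else item)
  (cleaned, final)

-- ===== PORT B =====
def get_prompt_variables_alt (data : List (List (String × String))) : (List (List (String × String))) × (List (List (String × String))) :=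
  let part := data.partition pvIsPV
  let triples := part.1.map pvParse
  let positions := PySem.List.sorted (PySem.Set.ofList (triples.map (·.1))) (fun x => x)
  let prompt_variables := positions.map (fun p =>
    let group := triples.foldl (fun g t => if t.1 == p then g.insert t.2.1 t.2.2 else g)
                   (PySem.Dict.empty : PySem.Dict String String)
    group.items.map (fun kv => (kv.1, pvNorm kv.2)))
  let others := part.2.map (fun item =>
    if PySem.Str.isIn "prompt" (pvGet item "name") then item.map (fun kv => (kv.1, pvNorm kv.2)) else item)
  (prompt_variables, others)

-- ===== PRECONDITION & SPEC =====
-- Pre_ excludes exactly the inputs where the Python A raises: an item without a 'name' key (KeyError), and a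
-- prompt_variables item whose name lacks two '[' (IndexError), whose bracketed position is not an int (ValueError),
-- or which has no 'value' key (KeyError).
def Pre_get_prompt_variables (data : List (List (String × String))) : Prop :=
  (data.all (fun item =>
    (PySem.Dict.mk item).contains "name" &&
    (!(pvIsPV item) ||
      (decide (3 ≤ (pvSplit (pvGet item "name") "[").length) &&
       (PySem.Int.ofStr? ((pvSplit (PySem.List.pyGetD (pvSplit (pvGet item "name") "[") 1 "") "]").headD "")).isSome &&
       (PySem.Dict.mk item).contains "value")))) = true
instance (data : List (List (String × String))) : Decidable (Pre_get_prompt_variables data) := by unfold Pre_get_prompt_variables; infer_instance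

def pvWitness_get_prompt_variables : (List (List (String × String))) :=
  [[("name", "prompt_variables[0][key]"), ("value", " Width ")],
   [("name", "prompt_variables[0][value]"), ("value", "512")],
   [("name", "workflow_id"), ("value", "5")],
   [("name", "the prompt"), ("value", " A  Cat ")]]

def Spec_get_prompt_variables (data : List (List (String × String))) (out : (List (List (String × String))) × (List (List (String × String)))) : Prop := out = get_prompt_variables_alt data
instance (data : List (List (String × String))) (out : (List (List (String × String))) × (List (List (String × String)))) : Decidable (Spec_get_prompt_variables data out) := by unfold Spec_get_prompt_variables; infer_instance

-- ===== CLAIM (what is proved, stated in full; the proofs are below) =====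
def Claim_equal_get_prompt_variables : Prop := ∀ (data : List (List (String × String))), Dom_get_prompt_variables data → Pre_get_prompt_variables data → Spec_get_prompt_variables data (get_prompt_variables data)

-- ===== LEMMAS AND PROOFS =====

-- the per-position dict that both sides end up building from the parsed triples
def pvGroup (ts : List (Int × String × String)) (p : Int) : PySem.Dict String String :=
  (ts.filter (fun t => t.1 == p)).foldl (fun g t => g.insert t.2.1 t.2.2) PySem.Dict.empty

theorem pvFold_keys_nodup (ts : List (Int × String × String)) :
    (ts.foldl pvStep PySem.Dict.empty).keys.Nodup := by
  exact PySem.Dict.nodup_keys_foldl_insert_key ts (fun t => t.1)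
    (fun d t => (d.getD t.1 PySem.Dict.empty).insert t.2.1 t.2.2) PySem.Dict.empty (by simp)

-- A's index dict, as items: the distinct positions in first-encounter order, each with its group dict
theorem pvFold_items (ts : List (Int × String × String)) :
    (ts.foldl pvStep PySem.Dict.empty).items
      = (PySem.Set.ofList (ts.map (·.1))).map (fun p => (p, pvGroup ts p)) := by
  induction ts using List.reverseRecOn with
  | nil => rfl
  | append_singleton ts t ih =>
    have hnd : (ts.foldl pvStep PySem.Dict.empty).keys.Nodup := pvFold_keys_nodup ts
    have hk : (ts.foldl pvStep PySem.Dict.empty).keys = PySem.Set.ofList (ts.map (·.1)) := by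
      simp only [PySem.Dict.keys, ih, List.map_map]
      exact List.map_id _
    have hset : PySem.Set.ofList ((ts ++ [t]).map (·.1))
        = PySem.Set.add (PySem.Set.ofList (ts.map (·.1))) t.1 := by
      rw [List.map_append, PySem.Set.ofList_eq_foldl, List.foldl_append, ← PySem.Set.ofList_eq_foldl]
      simp
    have hgroup : ∀ p, pvGroup (ts ++ [t]) p
        = if t.1 == p then (pvGroup ts p).insert t.2.1 t.2.2 else pvGroup ts p := by
      intro p
      unfold pvGroup
      rw [List.filter_append]
      by_cases h : t.1 = p <;> simp [h, List.foldl_append]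
    rw [List.foldl_append, List.foldl_cons, List.foldl_nil, hset]
    by_cases hc : (ts.foldl pvStep PySem.Dict.empty).contains t.1 = true
    · have t1mem : t.1 ∈ PySem.Set.ofList (ts.map (·.1)) := by
        have := (PySem.Dict.contains_iff_mem_keys _ t.1).mp hc
        rwa [hk] at this
      have hmemit : (t.1, pvGroup ts t.1) ∈ (ts.foldl pvStep PySem.Dict.empty).items := by
        rw [ih]; exact List.mem_map_of_mem t1mem
      have hget : (ts.foldl pvStep PySem.Dict.empty).getD t.1 PySem.Dict.empty = pvGroup ts t.1 :=
        PySem.Dict.getD_of_mem_items _ hmemit hnd _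
      have hadd : PySem.Set.add (PySem.Set.ofList (ts.map (·.1))) t.1 = PySem.Set.ofList (ts.map (·.1)) := by
        simp [PySem.Set.add, PySem.Set.contains, t1mem]
      rw [hadd, pvStep]
      rw [PySem.Dict.items_insert_of_contains _ _ hc, ih, List.map_map]
      apply List.map_congr_left
      intro p hp
      by_cases hpt : p = t.1
      · subst hpt
        simp [hget, hgroup]
      · have h1 : (p == t.1) = false := by simp [hpt]
        have h2 : (t.1 == p) = false := by simp only [beq_eq_false_iff_ne]; exact fun h => hpt h.symm
        simp [Function.comp, h1, hgroup, h2]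
    · have hcf : (ts.foldl pvStep PySem.Dict.empty).contains t.1 = false := by
        simpa using hc
      have t1nmem : t.1 ∉ PySem.Set.ofList (ts.map (·.1)) := by
        intro hmem
        rw [← hk] at hmem
        exact hc ((PySem.Dict.contains_iff_mem_keys _ t.1).mpr hmem)
      have hget : (ts.foldl pvStep PySem.Dict.empty).getD t.1 PySem.Dict.empty = PySem.Dict.empty :=
        PySem.Dict.getD_of_not_contains _ _ hcf
      have hadd : PySem.Set.add (PySem.Set.ofList (ts.map (·.1))) t.1
          = PySem.Set.ofList (ts.map (·.1)) ++ [t.1] := by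
        simp [PySem.Set.add, PySem.Set.contains, t1nmem]
      have hfilt : ts.filter (fun t' => t'.1 == t.1) = [] := by
        rw [List.filter_eq_nil_iff]
        intro t' ht'
        simp only [beq_iff_eq]
        intro hbe
        exact t1nmem (by rw [PySem.Set.mem_ofList]; exact hbe ▸ List.mem_map_of_mem ht')
      rw [hadd, pvStep]
      rw [PySem.Dict.items_insert_of_not_contains _ _ hcf, ih, List.map_append]
      congr 1
      · apply List.map_congr_left
        intro p hp
        have h2 : (t.1 == p) = false := by
          simp only [beq_eq_false_iff_ne]
          intro he
          exact t1nmem (he ▸ hp)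
        simp [hgroup, h2]
      · simp [hget, pvGroup, hfilt]

theorem pvSorted_items (ts : List (Int × String × String)) :
    PySem.List.sorted ((ts.foldl pvStep PySem.Dict.empty).items) (fun q => q.1)
      = (PySem.List.sorted (PySem.Set.ofList (ts.map (·.1))) (fun x => x)).map (fun p => (p, pvGroup ts p)) := by
  rw [pvFold_items]
  apply PySem.List.sorted_eq_of_perm_of_pairwise_lt
  · exact (PySem.List.sorted_perm _ _ false).map _
  · rw [List.pairwise_map]
    have hp1 : List.Pairwise (· ≤ ·) (PySem.List.sorted (PySem.Set.ofList (ts.map (·.1))) (fun x => x)) :=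
      PySem.List.sorted_pairwise _ _
    have hp2 : List.Pairwise (· ≠ ·) (PySem.List.sorted (PySem.Set.ofList (ts.map (·.1))) (fun x => x)) :=
      ((PySem.List.sorted_perm _ _ false).nodup_iff).mpr (PySem.Set.nodup_ofList _)
    exact (hp1.and hp2).imp (fun h => lt_of_le_of_ne h.1 h.2)

-- ===== VERDICT (by name: the statement is the Claim_ definition above) =====
theorem get_prompt_variables_spec : Claim_equal_get_prompt_variables := by
  intro data _ _
  unfold Spec_get_prompt_variables
  simp only [get_prompt_variables, get_prompt_variables_alt, List.partition_eq_filter_filter]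
  refine Prod.ext ?_ ?_
  · dsimp only
    rw [PySem.List.foldl_if_eq_foldl_filter pvIsPV (fun d item => pvStep d (pvParse item)),
        ← List.foldl_map (f := pvParse) (g := pvStep), pvSorted_items,
        PySem.List.foldl_append_singleton_eq_map (f := fun pv : PySem.Dict String String => pvCleanPairs pv.items)]
    simp only [List.map_map, List.nil_append]
    apply List.map_congr_left
    intro p hp
    rw [PySem.List.foldl_if_eq_foldl_filter (fun t : Int × String × String => t.1 == p)
        (fun (g : PySem.Dict String String) t => g.insert t.2.1 t.2.2)]
    simp [Function.comp, pvCleanPairs, pvGroup]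
  · have hswap : (fun (acc : List (List (String × String))) item =>
        if pvIsPV item = true then acc else acc ++ [item])
        = (fun acc item => if (!pvIsPV item) = true then acc ++ [item] else acc) := by
      funext acc item
      cases h : pvIsPV item <;> simp
    rw [hswap, PySem.List.foldl_append_if_eq_filter]
    simp [pvCleanPairs, Function.comp_def]
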